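-- pv_equiv track=rewrite | github.com/lepetitprinz/coding-challenge-auto-push | 프로그래머스/lv2/17683. ［3차］ 방금그곡/［3차］ 방금그곡.py | convert
-- ===== SOURCE A (Python) =====
-- conv_map = {'C': 'a', 'C#': 'b', 'D': 'c', 'D#': 'd', 'E': 'e', 'F': 'f', 'F#': 'g',
--             'G': 'h', 'G#': 'i', 'A': 'j', 'A#': 'k', 'B': 'l', 'E#': 'n'}
--
-- def convert(string):
--     length = len(string)
--
--     result = ''
--     for i in range(length):
--         if i < length-1:
--             if string[i+1] == '#':
--                 result += conv_map[string[i:i+2]]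
--             else:
--                 result += conv_map.get(string[i], '')
--         else:
--             result += conv_map.get(string[i], '')
--
--     return result
-- ===== SOURCE B (Python) =====
-- conv_map = {'C': 'a', 'C#': 'b', 'D': 'c', 'D#': 'd', 'E': 'e', 'F': 'f', 'F#': 'g',
--             'G': 'h', 'G#': 'i', 'A': 'j', 'A#': 'k', 'B': 'l', 'E#': 'n'}
--
-- def convert(string):
--     n = len(string)
--     out = []
--     i = 0
--     while i < n:
--         if i + 1 < n and string[i + 1] == '#':
--             out.append(conv_map[string[i:i + 2]])
--             i += 2
--         else:
--             out.append(conv_map.get(string[i], ''))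
--             i += 1
--     return ''.join(out)
-- ===== Notes on version B (the rewrite author's own statement) =====
-- stated objective: idiomatic
-- what changed: B tokenizes the string with an index-advancing while-loop that consumes a sharped note as one two-character token (advancing by 2) and joins the collected pieces at the end, instead of A's per-character index loop that revisits every sharp position and concatenates onto an accumulator string.
import Mathlib
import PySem

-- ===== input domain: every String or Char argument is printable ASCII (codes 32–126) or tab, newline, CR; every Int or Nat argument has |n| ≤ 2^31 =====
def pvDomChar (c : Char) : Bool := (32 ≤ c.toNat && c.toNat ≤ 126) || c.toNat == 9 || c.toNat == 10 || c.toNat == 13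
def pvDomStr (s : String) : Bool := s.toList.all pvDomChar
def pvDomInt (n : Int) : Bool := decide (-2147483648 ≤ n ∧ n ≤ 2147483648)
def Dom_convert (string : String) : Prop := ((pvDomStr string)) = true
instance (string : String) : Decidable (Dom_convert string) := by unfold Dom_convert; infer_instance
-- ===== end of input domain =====

-- B rewrites A as a tokenizing loop (note+'#' consumed as one token, pieces joined at the end)
-- instead of A's per-character index loop; equal return values proved on Pre_ (where A raises no KeyError).

-- module-level conv_map, shared context of both programs
def convMap : PySem.Dict String String :=
  PySem.Dict.ofList [("C","a"),("C#","b"),("D","c"),("D#","d"),("E","e"),("F","f"),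
                     ("F#","g"),("G","h"),("G#","i"),("A","j"),("A#","k"),("B","l"),("E#","n")]

-- ===== PORT A =====
-- A's loop body; inside Pre_ the two-char lookup conv_map[...] always succeeds, so getD "" is exact there.
def convert (string : String) : String :=
  let s := string.toList
  let length := s.length
  (List.range length).foldl (fun result i =>
    if i < length - 1 then
      if s.getD (i+1) ' ' = '#' then
        result ++ convMap.getD (String.ofList (PySem.List.slice s (some (i : Int)) (some ((i : Int) + 2)))) ""
      else
        result ++ convMap.getD (String.ofList [s.getD i ' ']) ""
    else
      result ++ convMap.getD (String.ofList [s.getD i ' ']) "") ""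

-- ===== PORT B =====
-- B's while-loop: advance i by 2 on a note+'#' token, by 1 otherwise; join the collected pieces.
def convertAltGo (s : List Char) (i : Nat) : List String :=
  if _h : i < s.length then
    if i + 1 < s.length ∧ s.getD (i+1) ' ' = '#' then
      convMap.getD (String.ofList (PySem.List.slice s (some (i : Int)) (some ((i : Int) + 2)))) ""
        :: convertAltGo s (i+2)
    else
      convMap.getD (String.ofList [s.getD i ' ']) "" :: convertAltGo s (i+1)
  else []
termination_by s.length - i

def convert_alt (string : String) : String :=
  String.join (convertAltGo string.toList 0)

-- ===== PRECONDITION & SPEC =====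
-- Pre_ excludes exactly the inputs on which A raises KeyError: a '#' preceded by a
-- character that is not one of the sharpable notes C D E F G A.
def Pre_convert (string : String) : Prop :=
  ∀ j < string.toList.length - 1,
    string.toList.getD (j+1) ' ' = '#' →
      string.toList.getD j ' ' ∈ (['C','D','E','F','G','A'] : List Char)
instance (string : String) : Decidable (Pre_convert string) := by unfold Pre_convert; infer_instance

def pvWitness_convert : String := "C#DG#x"

def Spec_convert (string : String) (out : String) : Prop := out = convert_alt string
instance (string : String) (out : String) : Decidable (Spec_convert string out) := by unfold Spec_convert; infer_instance

-- ===== CLAIM (what is proved, stated in full; the proofs are below) =====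
def Claim_equal_convert : Prop := ∀ (string : String), Dom_convert string → Pre_convert string → Spec_convert string (convert string)

-- ===== LEMMAS AND PROOFS =====

-- A's loop body at index i, as a named step function
def stepA (s : List Char) (i : Nat) : String :=
  if i < s.length - 1 then
    if s.getD (i+1) ' ' = '#' then
      convMap.getD (String.ofList (PySem.List.slice s (some (i : Int)) (some ((i : Int) + 2)))) ""
    else
      convMap.getD (String.ofList [s.getD i ' ']) ""
  else
    convMap.getD (String.ofList [s.getD i ' ']) ""

-- A's output from index i to the end, top-down
def sufA (s : List Char) (i : Nat) : String :=
  if _h : i < s.length then stepA s i ++ sufA s (i+1) else ""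
termination_by s.length - i

theorem foldl_range'_sufA (s : List Char) :
    ∀ (k i : Nat) (acc : String), i + k = s.length →
      (List.range' i k).foldl (fun result j => result ++ stepA s j) acc = acc ++ sufA s i := by
  intro k
  induction k with
  | zero =>
    intro i acc h
    rw [sufA]
    have : ¬ i < s.length := by omega
    simp [this]
  | succ k ih =>
    intro i acc h
    rw [List.range'_succ, List.foldl_cons, ih (i+1) _ (by omega)]
    conv_rhs => rw [sufA]
    have hlt : i < s.length := by omega
    simp [hlt, String.append_assoc]

theorem convert_eq_sufA (string : String) :
    convert string = sufA string.toList 0 := by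
  have h := foldl_range'_sufA string.toList string.toList.length 0 "" (by omega)
  rw [← List.range_eq_range'] at h
  have hb : (fun (result : String) j => result ++ stepA string.toList j)
      = (fun (result : String) i =>
      if i < string.toList.length - 1 then
        if string.toList.getD (i+1) ' ' = '#' then
          result ++ convMap.getD (String.ofList (PySem.List.slice string.toList (some (i : Int)) (some ((i : Int) + 2)))) ""
        else
          result ++ convMap.getD (String.ofList [string.toList.getD i ' ']) ""
      else
        result ++ convMap.getD (String.ofList [string.toList.getD i ' ']) "") := by
    funext r j
    simp only [stepA]
    split_ifs <;> rfl
  rw [hb] at h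
  simpa [convert] using h

theorem join_cons (a : String) (l : List String) :
    String.join (a :: l) = a ++ String.join l := by
  simp [String.join]
  induction l generalizing a with
  | nil => simp
  | cons b l ih => simp [List.foldl_cons, ih (a ++ b), ih b, String.append_assoc]

theorem sufA_eq_go (s : List Char)
    (hpre : ∀ j < s.length - 1, s.getD (j+1) ' ' = '#' → s.getD j ' ' ∈ (['C','D','E','F','G','A'] : List Char)) :
    ∀ i, sufA s i = String.join (convertAltGo s i) := by
  intro i
  induction hk : s.length - i using Nat.strong_induction_on generalizing i with
  | _ k ih =>
  rw [sufA, convertAltGo]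
  by_cases hi : i < s.length
  · rw [dif_pos hi, dif_pos hi]
    by_cases hsh : i + 1 < s.length ∧ s.getD (i+1) ' ' = '#'
    · -- two-char token: A's next step (index i+1, the '#') contributes "" inside Pre_
      rw [if_pos hsh, join_cons, ← ih (s.length - (i+2)) (by omega) (i+2) rfl]
      have h1 : i < s.length - 1 := by omega
      have step_i : stepA s i =
          convMap.getD (String.ofList (PySem.List.slice s (some (i : Int)) (some ((i : Int) + 2)))) "" := by
        simp only [stepA]
        rw [if_pos h1, if_pos hsh.2]
      rw [step_i]
      congr 1
      -- sufA s (i+1) = sufA s (i+2): the '#' index contributes get('#','') = ""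
      have hnotsharp : stepA s (i+1) = "" := by
        simp only [stepA]
        split_ifs with hA hB
        · exfalso
          have := hpre (i+1) hA hB
          rw [hsh.2] at this
          simp at this
        · rw [hsh.2]; rfl
        · rw [hsh.2]; rfl
      rw [sufA, dif_pos hsh.1, hnotsharp]
      simp
    · rw [if_neg hsh, join_cons, ← ih (s.length - (i+1)) (by omega) (i+1) rfl]
      congr 1
      by_cases h1 : i < s.length - 1
      · have hns : ¬ s.getD (i+1) ' ' = '#' := fun hc => hsh ⟨by omega, hc⟩
        simp only [stepA]
        rw [if_pos h1, if_neg hns]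
      · simp only [stepA]
        rw [if_neg h1]
  · rw [dif_neg hi, dif_neg hi]
    rfl

-- ===== VERDICT (by name: the statement is the Claim_ definition above) =====
theorem convert_spec : Claim_equal_convert := by
  intro string _ hpre
  unfold Spec_convert convert_alt
  rw [convert_eq_sufA]
  exact sufA_eq_go string.toList hpre 0
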